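-- pv_equiv track=rewrite | github.com/roccofab/Tax-ID-Code-Calculator | Tax_code.py | calculateSurname
-- ===== SOURCE A (Python) =====
-- vowels = "aeiouAEIOU"
--
-- def calculateSurname(surname):
--     cons = []
--     vow = []
--     for i in surname:
--         if i in vowels:
--             vow.append(i)
--         else:
--             cons.append(i)
--     characters = cons + vow + ['X'] * 2  #the order of the characters is important, first consonants then vowels and finally two characters 'X'
--     fullCode = "".join(characters)
--     codSurname = fullCode[:3]  # take the first 3 characters of the full string that contains cons,vows and two characters 'X'
--     return codSurname.upper()
-- ===== SOURCE B (Python) =====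
-- vowels = "aeiouAEIOU"
--
-- def calculateSurname(surname):
--     # one stable sort: consonants (key False) first, vowels (key True) after,
--     # each group in original order
--     ordered = sorted(surname, key=lambda c: c in vowels)
--     return ("".join(ordered) + "XX")[:3].upper()
-- ===== Notes on version B (the rewrite author's own statement) =====
-- stated objective: idiomatic
-- what changed: Replaced the explicit two-bucket partition loop (separate consonant and vowel accumulator lists) by a single stable sort keyed on the boolean vowel test, whose stability yields consonants then vowels each in original order; then pad, slice to three characters and uppercase.
import Mathlib
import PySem

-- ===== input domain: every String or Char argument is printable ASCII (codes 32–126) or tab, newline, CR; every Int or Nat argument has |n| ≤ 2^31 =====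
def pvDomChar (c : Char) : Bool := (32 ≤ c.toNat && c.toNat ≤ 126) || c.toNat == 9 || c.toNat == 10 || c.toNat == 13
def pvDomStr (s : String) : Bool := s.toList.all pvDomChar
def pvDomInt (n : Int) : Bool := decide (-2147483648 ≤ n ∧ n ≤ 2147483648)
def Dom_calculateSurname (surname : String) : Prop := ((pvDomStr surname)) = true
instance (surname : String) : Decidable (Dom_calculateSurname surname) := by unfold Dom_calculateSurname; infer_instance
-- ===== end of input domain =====

-- B replaces A's two-bucket partition loop by one stable sort on the boolean key "is vowel" (idiomatic, same result).


-- ===== PORT A =====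
def pvVowels : List Char := "aeiouAEIOU".toList

def calculateSurname (surname : String) : String :=
  -- the for-loop with the two accumulator lists cons / vow
  let p := surname.toList.foldl
    (fun (acc : List Char × List Char) i =>
      if PySem.Chars.isIn [i] pvVowels then (acc.1, acc.2 ++ [i]) else (acc.1 ++ [i], acc.2))
    ([], [])
  let characters := p.1 ++ p.2 ++ PySem.List.pyRepeat ['X'] 2
  let fullCode := characters          -- "".join over single characters is the list itself
  let codSurname := PySem.Chars.slice fullCode none (some 3)
  String.ofList (PySem.Chars.upper codSurname)

-- ===== PORT B =====
def calculateSurname_alt (surname : String) : String :=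
  let ordered := PySem.List.sorted surname.toList (fun c => PySem.Chars.isIn [c] pvVowels) false
  String.ofList (PySem.Chars.upper (PySem.Chars.slice (ordered ++ "XX".toList) none (some 3)))

-- ===== PRECONDITION & SPEC =====
def Spec_calculateSurname (surname : String) (out : String) : Prop := out = calculateSurname_alt surname
instance (surname : String) (out : String) : Decidable (Spec_calculateSurname surname out) := by unfold Spec_calculateSurname; infer_instance

-- ===== CLAIM (what is proved, stated in full; the proofs are below) =====
def Claim_equal_calculateSurname : Prop := ∀ (surname : String), Dom_calculateSurname surname → Spec_calculateSurname surname (calculateSurname surname)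

-- ===== LEMMAS AND PROOFS =====

-- abbreviation for the boolean key both programs test
def pvKey (c : Char) : Bool := PySem.Chars.isIn [c] pvVowels

-- inserting a consonant (key false) into "falses ++ trues" lands at the boundary
lemma pv_insert_false (x : Char) (hx : pvKey x = false) :
    ∀ (fs ts : List Char), (∀ y ∈ fs, pvKey y = false) → (∀ y ∈ ts, pvKey y = true) →
    PySem.List.insertBy (fun a b => decide (pvKey a < pvKey b)) x (fs ++ ts) = (fs ++ [x]) ++ ts := by
  intro fs
  induction fs with
  | nil =>
    intro ts _ hts
    cases ts with
    | nil => simp [PySem.List.insertBy]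
    | cons y ys =>
      have hy : pvKey y = true := hts y (by simp)
      simp [PySem.List.insertBy, hx, hy]
  | cons f fs ih =>
    intro ts hfs hts
    have hf : pvKey f = false := hfs f (by simp)
    simp only [List.cons_append, PySem.List.insertBy, hx, hf]
    simp [ih ts (fun y hy => hfs y (by simp [hy])) hts]

-- inserting a vowel (key true) goes to the very end
lemma pv_insert_true (x : Char) (hx : pvKey x = true) (l : List Char) :
    PySem.List.insertBy (fun a b => decide (pvKey a < pvKey b)) x l = l ++ [x] := by
  apply PySem.List.insertBy_of_forall_not_before
  intro y _
  simp [hx]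

-- the insertion-sort fold keeps the accumulator split as falses ++ trues
lemma pv_sort_fold (xs : List Char) :
    ∀ (fs ts : List Char), (∀ y ∈ fs, pvKey y = false) → (∀ y ∈ ts, pvKey y = true) →
    xs.foldl (fun acc x => PySem.List.insertBy (fun a b => decide (pvKey a < pvKey b)) x acc) (fs ++ ts)
      = (fs ++ xs.filter (fun c => !pvKey c)) ++ (ts ++ xs.filter pvKey) := by
  induction xs with
  | nil => intro fs ts _ _; simp
  | cons x xs ih =>
    intro fs ts hfs hts
    by_cases hx : pvKey x = true
    · rw [List.foldl_cons, pv_insert_true x hx, List.append_assoc fs ts [x],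
        ih fs (ts ++ [x]) hfs (by intro y hy; rcases List.mem_append.1 hy with h | h
                                  · exact hts y h
                                  · simp at h; subst h; exact hx)]
      simp [hx]
    · have hx' : pvKey x = false := by simpa using hx
      rw [List.foldl_cons, pv_insert_false x hx' fs ts hfs hts,
        ih (fs ++ [x]) ts (by intro y hy; rcases List.mem_append.1 hy with h | h
                              · exact hfs y h
                              · simp at h; subst h; exact hx') hts]
      simp [hx']

-- B's stable sort on the boolean key is exactly the stable partition
lemma pv_sorted_eq (xs : List Char) :
    PySem.List.sorted xs pvKey false = xs.filter (fun c => !pvKey c) ++ xs.filter pvKey := by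
  rw [PySem.List.sorted_eq_foldl_insertBy]
  have := pv_sort_fold xs [] [] (by simp) (by simp)
  simpa using this

-- A's loop computes exactly the two filters
lemma pv_loop_eq (xs : List Char) :
    ∀ (c v : List Char),
    xs.foldl (fun (acc : List Char × List Char) i =>
      if PySem.Chars.isIn [i] pvVowels then (acc.1, acc.2 ++ [i]) else (acc.1 ++ [i], acc.2)) (c, v)
      = (c ++ xs.filter (fun i => !pvKey i), v ++ xs.filter pvKey) := by
  induction xs with
  | nil => intro c v; simp
  | cons x xs ih =>
    intro c v
    by_cases hx : pvKey x = true
    · simp only [List.foldl_cons, pvKey] at hx ⊢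
      rw [if_pos hx, ih]
      simp [pvKey, hx]
    · have hx' : pvKey x = false := by simpa using hx
      simp only [List.foldl_cons, pvKey] at hx' ⊢
      rw [if_neg (by simp [hx']), ih]
      simp [pvKey, hx']

-- ===== VERDICT (by name: the statement is the Claim_ definition above) =====
theorem calculateSurname_spec : Claim_equal_calculateSurname := by
  intro s _
  unfold Spec_calculateSurname calculateSurname calculateSurname_alt
  rw [pv_loop_eq s.toList [] []]
  have hs : PySem.List.sorted s.toList (fun c => PySem.Chars.isIn [c] pvVowels) false
      = s.toList.filter (fun c => !pvKey c) ++ s.toList.filter pvKey := pv_sorted_eq s.toList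
  simp only [hs, List.nil_append]
  have hXX : PySem.List.pyRepeat ['X'] 2 = "XX".toList := by decide
  rw [hXX, List.append_assoc]
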